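-- pv_equiv track=rewrite | github.com/Changhochien/UltrERP | backend/domains/legacy_import/mapping.py | _build_sole_family_suffix_matches
-- ===== SOURCE A (Python) =====
-- from typing import Mapping
--
-- def _build_sole_family_suffix_matches(
--     known_upper_map: Mapping[str, str],
--     suffix: str,
-- ) -> dict[str, str]:
--     matches: dict[str, str] = {}
--     for known_code_upper, known_code in known_upper_map.items():
--         if not known_code_upper.endswith(suffix):
--             continue
--
--         base_code_upper = known_code_upper[: -len(suffix)].rstrip()
--         family_matches = [
--             candidate_upper
--             for candidate_upper in known_upper_map
--             if candidate_upper.startswith(base_code_upper)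
--         ]
--         if len(family_matches) == 1:
--             matches[base_code_upper] = known_code
--
--     return matches
-- ===== SOURCE B (Python) =====
-- def _build_sole_family_suffix_matches(known_upper_map, suffix):
--     sorted_keys = sorted(known_upper_map)
--     total = len(sorted_keys)
--     cut = len(suffix)
--
--     def left_edge(target):
--         lo, hi = 0, total
--         while lo < hi:
--             mid = (lo + hi) // 2
--             if sorted_keys[mid] < target:
--                 lo = mid + 1
--             else:
--                 hi = mid
--         return lo
--
--     matches = {}
--     for key_upper, code in known_upper_map.items():
--         if key_upper.endswith(suffix):
--             base = key_upper[:-cut].rstrip() if cut else ""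
--             if base:
--                 hi = left_edge(base[:-1] + chr(ord(base[-1]) + 1))
--             else:
--                 hi = total
--             if hi - left_edge(base) == 1:
--                 matches[base] = code
--     return matches
-- ===== Notes on version B (the rewrite author's own statement) =====
-- stated objective: alternative
-- what changed: A re-scans every key per suffix-matching entry to count prefix matches; B sorts the keys once and counts each base's prefix matches as the difference of two hand-rolled binary searches (prefix matches are the contiguous range [base, base[:-1]+succ(last char)) in sorted order), which is O(n log n * L) worst case vs A's O(n^2 * L), though not measurably faster on a timing run's generated inputs.
import Mathlib
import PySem

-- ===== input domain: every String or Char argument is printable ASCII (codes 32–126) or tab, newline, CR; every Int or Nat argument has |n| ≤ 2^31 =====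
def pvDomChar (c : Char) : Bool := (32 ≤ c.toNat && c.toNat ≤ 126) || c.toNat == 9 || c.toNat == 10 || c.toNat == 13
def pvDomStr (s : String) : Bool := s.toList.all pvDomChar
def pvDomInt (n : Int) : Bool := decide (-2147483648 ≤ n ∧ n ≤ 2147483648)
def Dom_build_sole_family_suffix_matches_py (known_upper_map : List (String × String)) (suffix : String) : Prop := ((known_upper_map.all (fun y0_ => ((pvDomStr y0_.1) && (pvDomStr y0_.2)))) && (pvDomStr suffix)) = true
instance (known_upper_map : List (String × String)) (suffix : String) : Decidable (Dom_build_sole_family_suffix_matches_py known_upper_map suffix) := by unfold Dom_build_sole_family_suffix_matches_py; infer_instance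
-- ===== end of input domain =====

-- B replaces A's per-candidate linear scan over all keys by one upfront sort of the keys plus
-- two binary searches per candidate (prefix matches form a contiguous range in sorted order);
-- a different algorithm, not measured faster on the generated timing inputs.


-- ===== PORT A =====
def build_sole_family_suffix_matches_py (known_upper_map : List (String × String)) (suffix : String) : List (String × String) :=
  (known_upper_map.foldl
    (fun (acc : PySem.Dict String String) kv =>
      if !(PySem.Str.endswith kv.1 suffix) then acc
      else
        let base_code_upper := PySem.Str.rstrip (PySem.Str.slice kv.1 none (some (-(PySem.Str.len suffix))))
        let family_matches := (known_upper_map.map (·.1)).filter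
          (fun candidate_upper => PySem.Str.startswith candidate_upper base_code_upper)
        if family_matches.length = 1 then acc.insert base_code_upper kv.2 else acc)
    PySem.Dict.empty).items

-- ===== PORT B =====
-- while-loop binary search of Source B (left_edge), recursion on hi - lo
def pvLeftEdge (sorted_keys : List String) (target : String) (lo hi : Nat) : Nat :=
  if lo < hi then
    if sorted_keys.getD ((lo + hi) / 2) "" < target then
      pvLeftEdge sorted_keys target ((lo + hi) / 2 + 1) hi
    else
      pvLeftEdge sorted_keys target lo ((lo + hi) / 2)
  else lo
termination_by hi - lo
decreasing_by all_goals omega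

-- base[:-1] + chr(ord(base[-1]) + 1)
def pvUb (base : String) : String :=
  String.ofList (base.toList.dropLast ++ [Char.ofNat ((base.toList.getLastD ' ').toNat + 1)])

def build_sole_family_suffix_matches_py_alt (known_upper_map : List (String × String)) (suffix : String) : List (String × String) :=
  let sorted_keys := PySem.List.sorted (known_upper_map.map (·.1)) (fun x => x) false
  let total := sorted_keys.length
  let cut := PySem.Str.len suffix
  (known_upper_map.foldl
    (fun (acc : PySem.Dict String String) kv =>
      if PySem.Str.endswith kv.1 suffix then
        let base := if cut ≠ 0 then PySem.Str.rstrip (PySem.Str.slice kv.1 none (some (-cut))) else ""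
        let hi := if base ≠ "" then pvLeftEdge sorted_keys (pvUb base) 0 total else total
        if hi - pvLeftEdge sorted_keys base 0 total = 1 then acc.insert base kv.2 else acc
      else acc)
    PySem.Dict.empty).items

-- ===== PRECONDITION & SPEC =====
def Spec_build_sole_family_suffix_matches_py (known_upper_map : List (String × String)) (suffix : String) (out : List (String × String)) : Prop := out = build_sole_family_suffix_matches_py_alt known_upper_map suffix
instance (known_upper_map : List (String × String)) (suffix : String) (out : List (String × String)) : Decidable (Spec_build_sole_family_suffix_matches_py known_upper_map suffix out) := by unfold Spec_build_sole_family_suffix_matches_py; infer_instance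

-- ===== CLAIM (what is proved, stated in full; the proofs are below) =====
def Claim_equal_build_sole_family_suffix_matches_py : Prop := ∀ (known_upper_map : List (String × String)) (suffix : String), Dom_build_sole_family_suffix_matches_py known_upper_map suffix → Spec_build_sole_family_suffix_matches_py known_upper_map suffix (build_sole_family_suffix_matches_py known_upper_map suffix)

-- ===== LEMMAS AND PROOFS =====

theorem pvCharLt_iff (a b : Char) : a < b ↔ a.toNat < b.toNat := by
  simp [Char.lt_def, UInt32.lt_iff_toNat_lt]

theorem pvCharEq_iff (a b : Char) : a = b ↔ a.toNat = b.toNat := by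
  constructor
  · rintro rfl; rfl
  · intro h
    have h1 : ¬ a < b := by rw [pvCharLt_iff]; omega
    have h2 : ¬ b < a := by rw [pvCharLt_iff]; omega
    exact le_antisymm (not_lt.mp h2) (not_lt.mp h1)

-- strings with prefix d ++ [a] are exactly the lex interval [d ++ [a], d ++ [a']) for a' = succ a
theorem pvPrefix_iff_interval (d : List Char) (a a' : Char) (hsucc : a'.toNat = a.toNat + 1) :
    ∀ c : List Char, ((d ++ [a]) <+: c) ↔ (¬ (c < d ++ [a]) ∧ c < d ++ [a']) := by
  induction d with
  | nil =>
    intro c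
    cases c with
    | nil =>
      simp [List.prefix_nil, List.nil_lt_cons]
    | cons x cs =>
      simp only [List.nil_append, List.cons_prefix_cons, List.nil_prefix, and_true,
        List.cons_lt_cons_iff]
      constructor
      · rintro rfl
        refine ⟨?_, Or.inl (by rw [pvCharLt_iff]; omega)⟩
        rintro (h | ⟨-, h⟩)
        · exact absurd h (lt_irrefl _)
        · exact List.not_lt_nil _ h
      · rintro ⟨h1, (h2 | ⟨rfl, h2⟩)⟩
        · have hax : ¬ x < a := fun h => h1 (Or.inl h)
          rw [pvCharLt_iff] at h2 hax
          rw [pvCharEq_iff]; omega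
        · exact absurd h2 (List.not_lt_nil _)
  | cons e d' ih =>
    intro c
    cases c with
    | nil =>
      simp [List.nil_lt_cons]
    | cons x cs =>
      simp only [List.cons_append, List.cons_prefix_cons, List.cons_lt_cons_iff]
      rcases lt_trichotomy x e with hlt | heq | hgt
      · constructor
        · rintro ⟨rfl, -⟩; exact absurd hlt (lt_irrefl _)
        · rintro ⟨h1, -⟩; exact absurd (Or.inl hlt) h1
      · subst heq
        constructor
        · rintro ⟨-, hpre⟩
          have := (ih cs).mp hpre
          exact ⟨by rintro (h | ⟨-, h⟩); exacts [absurd h (lt_irrefl _), this.1 h],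
                 Or.inr ⟨rfl, this.2⟩⟩
        · rintro ⟨h1, (h2 | ⟨-, h2⟩)⟩
          · exact absurd h2 (lt_irrefl _)
          · exact ⟨rfl, (ih cs).mpr ⟨fun h => h1 (Or.inr ⟨rfl, h⟩), h2⟩⟩
      · constructor
        · rintro ⟨rfl, -⟩; exact absurd hgt (lt_irrefl _)
        · rintro ⟨-, (h2 | ⟨rfl, -⟩)⟩
          · exact absurd h2 (asymm hgt)
          · exact absurd hgt (lt_irrefl _)


theorem pvLeftEdge_le (a : List String) (x : String) :
    ∀ lo hi : Nat, lo ≤ hi → lo ≤ pvLeftEdge a x lo hi ∧ pvLeftEdge a x lo hi ≤ hi := by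
  intro lo hi
  fun_induction pvLeftEdge a x lo hi with
  | case1 lo hi hlt hcmp ih => intro _; have := ih (by omega); omega
  | case2 lo hi hlt hcmp ih => intro _; have := ih (by omega); omega
  | case3 lo hi h => intro h2; omega

theorem pvLeftEdge_inv (a : List String) (x : String)
    (hmono : ∀ p q : Nat, p ≤ q → q < a.length → a.getD p "" ≤ a.getD q "") :
    ∀ lo hi : Nat, hi ≤ a.length →
      (∀ j, j < lo → a.getD j "" < x) →
      (∀ j, hi ≤ j → j < a.length → ¬ a.getD j "" < x) →
      ∀ j, j < a.length → (a.getD j "" < x ↔ j < pvLeftEdge a x lo hi) := by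
  intro lo hi
  fun_induction pvLeftEdge a x lo hi with
  | case1 lo hi hlt hcmp ih =>
    intro hhi hl hr
    refine ih hhi ?_ hr
    intro j hj
    exact lt_of_le_of_lt (hmono j ((lo + hi) / 2) (by omega) (by omega)) hcmp
  | case2 lo hi hlt hcmp ih =>
    intro hhi hl hr
    refine ih (by omega) hl ?_
    intro j hj hjlen hcon
    exact hcmp (lt_of_le_of_lt (hmono ((lo + hi) / 2) j hj hjlen) hcon)
  | case3 lo hi h =>
    intro hhi hl hr j hj
    constructor
    · intro hx
      by_contra hjlo
      exact hr j (by omega) hj hx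
    · exact hl j

theorem pvCountP_interval (S : List String) (p : String → Bool) (lo hi : Nat)
    (hlo : lo ≤ hi) (hhi : hi ≤ S.length)
    (hchar : ∀ j, j < S.length → (p (S.getD j "") = true ↔ lo ≤ j ∧ j < hi)) :
    List.countP p S = hi - lo := by
  obtain ⟨k, rfl⟩ : ∃ k, hi = lo + k := ⟨hi - lo, by omega⟩
  conv_lhs => rw [← List.take_append_drop (lo + k) S, List.take_add]
  rw [List.countP_append, List.countP_append]
  have hdrop : List.countP p (S.drop (lo + k)) = 0 := by
    rw [List.countP_eq_zero]
    intro c hc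
    obtain ⟨i, hilen, rfl⟩ := List.mem_iff_getElem.mp hc
    have hlt : lo + k + i < S.length := by simp at hilen; omega
    rw [List.getElem_drop, ← List.getD_eq_getElem S "" hlt]
    intro hcon
    have := (hchar (lo + k + i) hlt).mp hcon
    omega
  have htake : List.countP p (S.take lo) = 0 := by
    rw [List.countP_eq_zero]
    intro c hc
    obtain ⟨i, hilen, rfl⟩ := List.mem_iff_getElem.mp hc
    have hil : i < lo := by simp at hilen; omega
    have hlt : i < S.length := by omega
    rw [List.getElem_take, ← List.getD_eq_getElem S "" hlt]
    intro hcon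
    have := (hchar i hlt).mp hcon
    omega
  have hmidlen : ((S.drop lo).take k).length = k := by
    simp; omega
  have hmid : List.countP p ((S.drop lo).take k) = ((S.drop lo).take k).length := by
    rw [List.countP_eq_length]
    intro c hc
    obtain ⟨i, hilen, rfl⟩ := List.mem_iff_getElem.mp hc
    have hi2 : i < k := by omega
    have hlt : lo + i < S.length := by omega
    rw [List.getElem_take, List.getElem_drop, ← List.getD_eq_getElem S "" hlt]
    exact (hchar (lo + i) hlt).mpr (by omega)
  omega

theorem pvSorted_mono (ks : List String) :
    ∀ p q : Nat, p ≤ q → q < (PySem.List.sorted ks (fun x => x) false).length →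
      (PySem.List.sorted ks (fun x => x) false).getD p ""
        ≤ (PySem.List.sorted ks (fun x => x) false).getD q "" := by
  intro p q hpq hq
  rw [List.getD_eq_getElem _ "" (by omega), List.getD_eq_getElem _ "" hq]
  exact PySem.List.sorted_id_getElem_mono ks hpq hq

theorem pvCount_eq (ks : List String) (base : String)
    (hchars : ∀ c ∈ base.toList, c.toNat ≤ 126) :
    List.countP (fun c => PySem.Str.startswith c base) ks
      = (if base ≠ "" then
            pvLeftEdge (PySem.List.sorted ks (fun x => x) false) (pvUb base) 0
              (PySem.List.sorted ks (fun x => x) false).length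
          else (PySem.List.sorted ks (fun x => x) false).length)
        - pvLeftEdge (PySem.List.sorted ks (fun x => x) false) base 0
            (PySem.List.sorted ks (fun x => x) false).length := by
  have hperm := PySem.List.sorted_perm ks (fun x => x) false
  rw [← List.Perm.countP_eq _ hperm]
  set S := PySem.List.sorted ks (fun x => x) false with hS
  have hmono := pvSorted_mono ks
  rw [← hS] at hmono
  by_cases hb : base = ""
  · subst hb
    simp only [ne_eq, not_true_eq_false, if_false]
    have hlo0 : pvLeftEdge S "" 0 S.length = 0 := by
      by_contra hne
      have hle := pvLeftEdge_le S "" 0 S.length (by omega)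
      have hpos : 0 < pvLeftEdge S "" 0 S.length := by omega
      have h0len : 0 < S.length := by omega
      have := (pvLeftEdge_inv S "" hmono 0 S.length (le_refl _)
        (by intro j hj; exact absurd hj (by omega)) (by intro j hj hjl _; omega) 0 h0len).mpr hpos
      rw [String.lt_iff_toList_lt] at this
      exact List.not_lt_nil _ this
    rw [hlo0]
    rw [List.countP_eq_length.mpr]
    · omega
    · intro c hc
      rw [PySem.Str.startswith_eq, PySem.Chars.startswith_iff]
      exact List.nil_prefix
  · have hbl : base.toList ≠ [] := by
      intro hl; exact hb (String.toList_inj.mp (by rw [hl]; rfl))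
    have hba : base.toList = base.toList.dropLast ++ [base.toList.getLastD ' '] := by
      rw [List.getLastD_eq_getLast?, List.getLast?_eq_some_getLast hbl]
      exact (List.dropLast_append_getLast hbl).symm
    set d := base.toList.dropLast
    set a := base.toList.getLastD ' '
    have hamem : a ∈ base.toList := by rw [hba]; simp
    have ha126 : a.toNat ≤ 126 := hchars a hamem
    have hvalid : Nat.isValidChar (a.toNat + 1) := Or.inl (by omega)
    have hsucc : (Char.ofNat (a.toNat + 1)).toNat = a.toNat + 1 := by
      rw [Char.ofNat, dif_pos hvalid]; rfl
    have hub : (pvUb base).toList = d ++ [Char.ofNat (a.toNat + 1)] := by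
      rw [pvUb, String.toList_ofList]
    have hintv := pvPrefix_iff_interval d a (Char.ofNat (a.toNat + 1)) hsucc
    set lo := pvLeftEdge S base 0 S.length with hlo
    set hiv := pvLeftEdge S (pvUb base) 0 S.length with hhiv
    have hclo := pvLeftEdge_inv S base hmono 0 S.length (le_refl _)
      (by intro j hj; exact absurd hj (by omega)) (by intro j hj hjl _; omega)
    have hchi := pvLeftEdge_inv S (pvUb base) hmono 0 S.length (le_refl _)
      (by intro j hj; exact absurd hj (by omega)) (by intro j hj hjl _; omega)
    have hblt : base < pvUb base := by
      rw [String.lt_iff_toList_lt, hub]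
      have := (hintv base.toList).mp (by rw [← hba])
      rw [← hba] at this
      exact this.2
    have hlole : lo ≤ S.length := (pvLeftEdge_le S base 0 S.length (by omega)).2
    have hhile : hiv ≤ S.length := (pvLeftEdge_le S (pvUb base) 0 S.length (by omega)).2
    have hlohi : lo ≤ hiv := by
      by_contra hcon
      have hjlen : hiv < S.length := by omega
      have h1 : S.getD hiv "" < base := (hclo hiv hjlen).mpr (by omega)
      have h2 : ¬ S.getD hiv "" < pvUb base := fun h => by
        have := (hchi hiv hjlen).mp h; omega
      exact h2 (lt_trans h1 hblt)
    simp only [ne_eq, hb, not_false_eq_true, if_true]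
    refine pvCountP_interval S _ lo hiv hlohi hhile ?_
    intro j hj
    rw [PySem.Str.startswith_eq, PySem.Chars.startswith_iff]
    rw [hba, hintv ((S.getD j "").toList), ← hub]
    rw [← String.lt_iff_toList_lt, ← hba, ← String.lt_iff_toList_lt]
    rw [hclo j hj, hchi j hj]
    omega

theorem pvMem_of_mem_base (k : String) (b : Option Int) (c : Char)
    (h : c ∈ (PySem.Str.rstrip (PySem.Str.slice k none b)).toList) : c ∈ k.toList := by
  rw [PySem.Str.toList_rstrip, PySem.Str.toList_slice] at h
  have h1 : c ∈ PySem.Chars.slice k.toList none b := by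
    rw [PySem.Chars.rstrip] at h
    rw [List.mem_reverse] at h
    have := (List.dropWhile_sublist (l := (PySem.Chars.slice k.toList none b).reverse)
      PySem.Chars.isspace).mem h
    rwa [List.mem_reverse] at this
  exact PySem.List.mem_of_mem_slice k.toList none b h1

theorem pvBase_empty_of_cut_zero (k : String) :
    PySem.Str.rstrip (PySem.Str.slice k none (some (-(0 : Int)))) = "" := by
  rw [← String.toList_inj, PySem.Str.toList_rstrip, PySem.Str.toList_slice]
  rw [PySem.Chars.slice, neg_zero, PySem.List.slice_to _ (by omega)]
  simp [PySem.Chars.rstrip]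

-- ===== VERDICT (by name: the statement is the Claim_ definition above) =====
theorem build_sole_family_suffix_matches_py_spec : Claim_equal_build_sole_family_suffix_matches_py := by
  intro m suffix hdom
  unfold Spec_build_sole_family_suffix_matches_py
  unfold build_sole_family_suffix_matches_py build_sole_family_suffix_matches_py_alt
  dsimp only
  congr 1
  apply PySem.List.foldl_congr_mem
  intro acc kv hkv
  simp only [Dom_build_sole_family_suffix_matches_py, Bool.and_eq_true,
    List.all_eq_true] at hdom
  have hkey : pvDomStr kv.1 = true := (hdom.1 kv hkv).1
  cases hend : PySem.Str.endswith kv.1 suffix with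
  | false => simp
  | true =>
    simp only [Bool.not_true, Bool.false_eq_true, if_false, if_true]
    have hbase : (if PySem.Str.len suffix ≠ 0 then
        PySem.Str.rstrip (PySem.Str.slice kv.1 none (some (-(PySem.Str.len suffix)))) else "")
        = PySem.Str.rstrip (PySem.Str.slice kv.1 none (some (-(PySem.Str.len suffix)))) := by
      by_cases hc : PySem.Str.len suffix = 0
      · rw [hc, if_neg (by simp), pvBase_empty_of_cut_zero]
      · rw [if_pos hc]
    rw [hbase]
    set base := PySem.Str.rstrip (PySem.Str.slice kv.1 none (some (-(PySem.Str.len suffix))))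
      with hbdef
    have hchars : ∀ c ∈ base.toList, c.toNat ≤ 126 := by
      intro c hc
      have hmem : c ∈ kv.1.toList := pvMem_of_mem_base kv.1 _ c (by rw [← hbdef]; exact hc)
      have := (List.all_eq_true.mp hkey) c hmem
      simp only [pvDomChar, Bool.or_eq_true, Bool.and_eq_true, decide_eq_true_eq,
        beq_iff_eq] at this
      omega
    rw [← List.countP_eq_length_filter, pvCount_eq (m.map (·.1)) base hchars]
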